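-- pv_equiv track=rewrite | github.com/HamishPain/time2org | node_helper.py | findLinksInText
-- ===== SOURCE A (Python) =====
-- from typing import Dict, List, Set
--
-- def findBracketedText(text: str):
--   stack = []
--   base_count = 0
--   for i, c in enumerate(text):
--       if c == '[':
--           stack.append(i)
--       elif c == ']' and stack:
--           start = stack.pop()
--           selected_text = text[start + 1: i]
--           if len(stack) == 0:
--             yield selected_text
--             base_count += 1
--
-- def findLinksInText(text: str) -> Dict[str,List[str]]:
--   bracket_list = list(findBracketedText(text))
--   link_dict = {}
--   for text in bracket_list:
--     text_split = list(findBracketedText(text))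
--     node_ID, link_type, description = "","",""
--     # Link
--     if len(text_split) == 1 and not '[' in text_split[0] and not ']' in text_split[0]:
--       node_ID = text_split[0]
--     # Link | Type
--     elif len(text_split) == 2:
--       node_ID, link_type = text_split
--     # Link | Type | Description
--     elif len(text_split) == 3:
--       node_ID, link_type, description = text_split
--     else:
--       continue
--
--     if not link_type in link_dict: link_dict[link_type] = []
--     link_dict[link_type].append(node_ID)
--   return link_dict
-- ===== SOURCE B (Python) =====
-- # B: single left-to-right scan with an integer bracket depth and char buffers,
-- # committing each top-level group as it closes (no second parsing pass).
-- from typing import Dict, List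
--
-- def _commit(segs, link_dict):
--     if len(segs) == 1 and '[' not in segs[0] and ']' not in segs[0]:
--         node_ID, link_type = segs[0], ""
--     elif len(segs) == 2:
--         node_ID, link_type = segs
--     elif len(segs) == 3:
--         node_ID, link_type = segs[0], segs[1]
--     else:
--         return
--     link_dict.setdefault(link_type, []).append(node_ID)
--
-- def findLinksInText(text: str) -> Dict[str, List[str]]:
--     link_dict = {}
--     depth = 0
--     cur = []    # chars of the current depth-2 segment (raw, incl. nested brackets)
--     segs = []   # completed depth-2 segments of the current top-level group
--     for c in text:
--         if c == '[':
--             depth += 1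
--             if depth == 2:
--                 cur = []
--             elif depth > 2:
--                 cur.append(c)
--         elif c == ']':
--             if depth > 0:
--                 depth -= 1
--                 if depth == 1:
--                     segs.append(''.join(cur))
--                 elif depth >= 2:
--                     cur.append(c)
--                 else:
--                     _commit(segs, link_dict)
--                     segs = []
--         elif depth >= 2:
--             cur.append(c)
--     return link_dict
-- ===== Notes on version B (the rewrite author's own statement) =====
-- stated objective: alternative
-- what changed: Replaced the two-phase parse (generator collecting top-level bracket groups as slices, then re-running the same generator on each group) with one left-to-right scan that tracks an integer bracket depth and buffers the current depth-2 segment, committing each group into the dict the moment its closing bracket is seen.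
import Mathlib
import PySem

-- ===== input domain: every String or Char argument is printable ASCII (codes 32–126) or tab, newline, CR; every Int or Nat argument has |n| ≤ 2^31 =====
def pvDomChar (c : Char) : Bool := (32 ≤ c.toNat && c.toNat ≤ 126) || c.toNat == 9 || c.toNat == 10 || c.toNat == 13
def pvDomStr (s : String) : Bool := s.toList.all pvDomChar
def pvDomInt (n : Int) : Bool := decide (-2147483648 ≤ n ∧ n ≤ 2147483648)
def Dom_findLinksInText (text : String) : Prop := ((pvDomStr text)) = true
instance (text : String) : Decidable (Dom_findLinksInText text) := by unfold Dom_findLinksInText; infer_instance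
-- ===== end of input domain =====

-- B replaces A's two-phase parse (collect top-level bracket groups via an index stack and
-- slicing, then re-parse each group) by a single left-to-right scan with a bracket-depth
-- counter that commits every group into the dict as its closing bracket is seen
-- (objective: alternative single-pass structure; no speed claim).

-- ===== PORT A =====
-- findBracketedText: generator over enumerate(text) with an index stack; yields text[start+1:i]
-- when the popped bracket is top-level (stack empties); base_count is the unused counter.
def pvStepA (cs : List Char) (s : List Int × List String × Int) (p : Int × Char) :
    List Int × List String × Int :=
  let (stack, acc, bc) := s
  let (i, c) := p
  if c = '[' then (i :: stack, acc, bc)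
  else if c = ']' then
    match stack with
    | [] => (stack, acc, bc)
    | start :: rest =>
      if rest = [] then
        (rest, acc ++ [String.ofList (PySem.List.slice cs (some (start + 1)) (some i))], bc + 1)
      else (rest, acc, bc)
  else (stack, acc, bc)

def pyFindBracketedText (text : String) : List String :=
  ((PySem.List.enumerate text.toList 0).foldl (pvStepA text.toList) ([], [], 0)).2.1

def findLinksInText (text : String) : List (String × List String) :=
  let bracket_list := pyFindBracketedText text
  (bracket_list.foldl (fun (link_dict : PySem.Dict String (List String)) t =>
      let text_split := pyFindBracketedText t
      match text_split with
      | [a] =>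
        if ¬ PySem.Str.isIn "[" a ∧ ¬ PySem.Str.isIn "]" a then
          let d := if link_dict.contains "" then link_dict else link_dict.insert "" []
          d.modify "" [] (fun l => l ++ [a])
        else link_dict
      | [a, b] =>
        let d := if link_dict.contains b then link_dict else link_dict.insert b []
        d.modify b [] (fun l => l ++ [a])
      | [a, b, _] =>
        let d := if link_dict.contains b then link_dict else link_dict.insert b []
        d.modify b [] (fun l => l ++ [a])
      | _ => link_dict) PySem.Dict.empty).items

-- ===== PORT B =====
-- _commit: interpret the buffered depth-2 segments of one closed group, push into the dict.
def pvCommit (segs : List String) (link_dict : PySem.Dict String (List String)) :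
    PySem.Dict String (List String) :=
  let r : Option (String × String) :=
    if segs.length = 1 ∧ ¬ PySem.Str.isIn "[" (segs.getD 0 "") ∧ ¬ PySem.Str.isIn "]" (segs.getD 0 "") then
      some (segs.getD 0 "", "")
    else if segs.length = 2 then some (segs.getD 0 "", segs.getD 1 "")
    else if segs.length = 3 then some (segs.getD 0 "", segs.getD 1 "")
    else none
  match r with
  | some (node_ID, link_type) =>
    (link_dict.setdefault link_type []).modify link_type [] (fun l => l ++ [node_ID])
  | none => link_dict

-- state: (depth, cur = chars of current depth-2 segment, segs, link_dict)
def pvStepB (s : Nat × List Char × List String × PySem.Dict String (List String)) (c : Char) :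
    Nat × List Char × List String × PySem.Dict String (List String) :=
  let (depth, cur, segs, dict) := s
  if c = '[' then
    if depth + 1 = 2 then (depth + 1, [], segs, dict)
    else if depth + 1 > 2 then (depth + 1, cur ++ [c], segs, dict)
    else (depth + 1, cur, segs, dict)
  else if c = ']' then
    if 0 < depth then
      if depth - 1 = 1 then (depth - 1, cur, segs ++ [String.ofList cur], dict)
      else if 2 ≤ depth - 1 then (depth - 1, cur ++ [c], segs, dict)
      else (depth - 1, cur, [], pvCommit segs dict)
    else s
  else if 2 ≤ depth then (depth, cur ++ [c], segs, dict)
  else s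

def findLinksInText_alt (text : String) : List (String × List String) :=
  ((text.toList.foldl pvStepB (0, [], [], PySem.Dict.empty)).2.2.2).items



-- ===== LEMMAS AND PROOFS =====


-- ===== PRECONDITION & SPEC =====
def Spec_findLinksInText (text : String) (out : List (String × List String)) : Prop := out = findLinksInText_alt text
instance (text : String) (out : List (String × List String)) : Decidable (Spec_findLinksInText text out) := by unfold Spec_findLinksInText; infer_instance

-- ===== CLAIM (what is proved, stated in full; the proofs are below) =====
def Claim_equal_findLinksInText : Prop := ∀ (text : String), Dom_findLinksInText text → Spec_findLinksInText text (findLinksInText text)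

-- ===== LEMMAS AND PROOFS =====

-- Ghost parser: stack of buffers, one per open '['; every buffer receives every character,
-- so a buffer opened at index i is always exactly text[i+1 : current].
def gStep (s : List (List Char) × List (List Char)) (c : Char) :
    List (List Char) × List (List Char) :=
  let (stk, acc) := s
  if c = '[' then ([] :: stk.map (· ++ [c]), acc)
  else if c = ']' then
    match stk with
    | [] => ([], acc)
    | b :: rest => (rest.map (· ++ [c]), if rest = [] then acc ++ [b] else acc)
  else (stk.map (· ++ [c]), acc)

-- the dict built from a list of (contents of) closed top-level groups
def gFold (gacc : List (List Char)) : PySem.Dict String (List String) :=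
  gacc.foldl (fun d b => pvCommit (((b.foldl gStep ([], [])).2).map String.ofList) d) PySem.Dict.empty



theorem pvAgen (full : List Char) (cs : List Char) :
    ∀ (n : Nat) (idxs : List Nat) (gacc : List (List Char)) (bc : Int),
      cs = full.drop n → (∀ idx ∈ idxs, idx < n) →
      ((PySem.List.enumerate cs (n : Int)).foldl (pvStepA full)
          (idxs.map (fun k => (k : Int)), gacc.map String.ofList, bc)).2.1
        = ((cs.foldl gStep (idxs.map (fun idx => (full.take n).drop (idx + 1)), gacc)).2).map String.ofList := by
  induction cs with
  | nil => intro n idxs gacc bc _ _; simp [PySem.List.enumerate]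
  | cons c cs ih =>
    intro n idxs gacc bc hdrop hidx
    have hn : n < full.length := by
      by_contra h
      have : full.drop n = [] := List.drop_eq_nil_of_le (by omega)
      simp [this] at hdrop
    have hget? : full[n]? = some c := by
      have := congrArg List.head? hdrop
      simpa [List.head?_drop] using this.symm
    have hcs : cs = full.drop (n + 1) := by
      have := congrArg List.tail hdrop
      simpa [List.tail_drop] using this
    have htake : full.take (n + 1) = full.take n ++ [c] := by
      rw [List.take_add_one, hget?]; rfl
    have hmapext : ∀ (l : List Nat), (∀ x ∈ l, x < n) →
        l.map (fun idx => (full.take (n+1)).drop (idx + 1))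
          = (l.map (fun idx => (full.take n).drop (idx + 1))).map (· ++ [c]) := by
      intro l hl
      rw [List.map_map]
      refine List.map_congr_left (fun x hx => ?_)
      rw [htake, List.drop_append_of_le_length (by simp; have := hl x hx; omega)]
      rfl
    have hcast : ((n : Int) + 1) = ((n + 1 : Nat) : Int) := by push_cast; ring
    rw [PySem.List.enumerate_cons, List.foldl_cons, hcast]
    by_cases hbr : c = '['
    · subst hbr
      have hA : pvStepA full (idxs.map (fun k => (k : Int)), gacc.map String.ofList, bc) ((n : Int), '[')
          = ((n :: idxs).map (fun k => (k : Int)), gacc.map String.ofList, bc) := by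
        simp [pvStepA]
      have hG : gStep (idxs.map (fun idx => (full.take n).drop (idx + 1)), gacc) '['
          = ((n :: idxs).map (fun idx => (full.take (n+1)).drop (idx + 1)), gacc) := by
        have hnil : (full.take (n+1)).drop (n+1) = [] := by
          rw [List.drop_eq_nil_iff, List.length_take]; omega
        simp [gStep, hmapext idxs hidx, hnil]
      rw [hA, List.foldl_cons, hG]
      exact ih (n+1) (n :: idxs) gacc bc hcs
        (by intro x hx; rw [List.mem_cons] at hx
            rcases hx with rfl | hx
            · omega
            · exact Nat.lt_succ_of_lt (hidx _ hx))
    · by_cases hcl : c = ']'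
      · subst hcl
        cases idxs with
        | nil =>
          have hA : pvStepA full (([] : List Nat).map (fun k => (k : Int)), gacc.map String.ofList, bc) ((n : Int), ']')
              = ([], gacc.map String.ofList, bc) := by simp [pvStepA]
          have hG : gStep (([] : List Nat).map (fun idx => (full.take n).drop (idx + 1)), gacc) ']'
              = (([] : List Nat).map (fun idx => (full.take (n+1)).drop (idx + 1)), gacc) := by
            simp [gStep]
          rw [hA, List.foldl_cons, hG]
          exact ih (n+1) [] gacc bc hcs (by simp)
        | cons j rest =>
          have hjn : j < n := hidx j (by simp)
          have hsel : String.ofList (PySem.List.slice full (some ((j:Int) + 1)) (some (n:Int)))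
              = String.ofList ((full.take n).drop (j + 1)) := by
            rw [show ((j:Int)+1) = ((j+1 : Nat) : Int) by push_cast; ring]
            rw [PySem.List.slice_natCast, List.drop_take]
          by_cases hrest : rest = []
          · subst hrest
            have hA : pvStepA full ([j].map (fun k => (k : Int)), gacc.map String.ofList, bc) ((n : Int), ']')
                = ([], (gacc ++ [(full.take n).drop (j+1)]).map String.ofList, bc + 1) := by
              simp [pvStepA, hsel]
            have hG : gStep ([j].map (fun idx => (full.take n).drop (idx + 1)), gacc) ']'
                = (([] : List Nat).map (fun idx => (full.take (n+1)).drop (idx + 1)),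
                    gacc ++ [(full.take n).drop (j+1)]) := by
              simp [gStep]
            rw [hA, List.foldl_cons, hG]
            exact ih (n+1) [] (gacc ++ [(full.take n).drop (j+1)]) (bc+1) hcs (by simp)
          · have hA : pvStepA full ((j :: rest).map (fun k => (k : Int)), gacc.map String.ofList, bc) ((n : Int), ']')
                = (rest.map (fun k => (k : Int)), gacc.map String.ofList, bc) := by
              simp [pvStepA]
              exact List.exists_mem_of_ne_nil rest hrest
            have hG : gStep ((j :: rest).map (fun idx => (full.take n).drop (idx + 1)), gacc) ']'
                = (rest.map (fun idx => (full.take (n+1)).drop (idx + 1)), gacc) := by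
              simp [gStep, List.map_eq_nil_iff, hrest, hmapext rest (fun x hx => hidx x (by simp [hx]))]
            rw [hA, List.foldl_cons, hG]
            exact ih (n+1) rest gacc bc hcs
              (fun x hx => Nat.lt_succ_of_lt (hidx x (by simp [hx])))
      · have hA : pvStepA full (idxs.map (fun k => (k : Int)), gacc.map String.ofList, bc) ((n : Int), c)
            = (idxs.map (fun k => (k : Int)), gacc.map String.ofList, bc) := by
          simp [pvStepA, hbr, hcl]
        have hG : gStep (idxs.map (fun idx => (full.take n).drop (idx + 1)), gacc) c
            = (idxs.map (fun idx => (full.take (n+1)).drop (idx + 1)), gacc) := by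
          simp [gStep, hbr, hcl, hmapext idxs hidx]
        rw [hA, List.foldl_cons, hG]
        exact ih (n+1) idxs gacc bc hcs (fun x hx => Nat.lt_succ_of_lt (hidx x hx))

theorem pvGfold_append (gacc : List (List Char)) (b : List Char) :
    gFold (gacc ++ [b]) = pvCommit (((b.foldl gStep ([], [])).2).map String.ofList) (gFold gacc) := by
  simp [gFold, List.foldl_append]

theorem pvBgen (cs : List Char) :
    ∀ (gstk gacc : List (List Char)) (cur : List Char) (segs : List String),
      ((gstk = [] ∧ segs = []) ∨
        (∃ inner bot, gstk = inner ++ [bot]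
          ∧ bot.foldl gStep ([], []) = (inner, segs.map String.toList)
          ∧ (inner = [] ∨ ∃ inner2 b2, inner = inner2 ++ [b2] ∧ cur = b2))) →
      (cs.foldl pvStepB (gstk.length, cur, segs, gFold gacc)).2.2.2
        = gFold ((cs.foldl gStep (gstk, gacc)).2) := by
  induction cs with
  | nil => intro gstk gacc cur segs _; rfl
  | cons c cs ih =>
    intro gstk gacc cur segs h
    rcases h with ⟨rfl, rfl⟩ | ⟨inner, bot, rfl, hrun, hcur⟩
    · -- depth 0
      by_cases hbr : c = '['
      · subst hbr
        have hB : pvStepB (([] : List (List Char)).length, cur, [], gFold gacc) '['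
            = (([[]] : List (List Char)).length, cur, [], gFold gacc) := by
          simp [pvStepB]
        have hG : gStep (([] : List (List Char)), gacc) '[' = ([[]], gacc) := by simp [gStep]
        rw [List.foldl_cons, List.foldl_cons, hB, hG]
        exact ih [[]] gacc cur [] (Or.inr ⟨[], [], rfl, by simp, Or.inl rfl⟩)
      · by_cases hcl : c = ']'
        · subst hcl
          have hB : pvStepB (([] : List (List Char)).length, cur, [], gFold gacc) ']'
              = (([] : List (List Char)).length, cur, [], gFold gacc) := by
            simp [pvStepB]
          have hG : gStep (([] : List (List Char)), gacc) ']' = ([], gacc) := by simp [gStep]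
          rw [List.foldl_cons, List.foldl_cons, hB, hG]
          exact ih [] gacc cur [] (Or.inl ⟨rfl, rfl⟩)
        · have hB : pvStepB (([] : List (List Char)).length, cur, [], gFold gacc) c
              = (([] : List (List Char)).length, cur, [], gFold gacc) := by
            simp [pvStepB, hbr, hcl]
          have hG : gStep (([] : List (List Char)), gacc) c = ([], gacc) := by
            simp [gStep, hbr, hcl]
          rw [List.foldl_cons, List.foldl_cons, hB, hG]
          exact ih [] gacc cur [] (Or.inl ⟨rfl, rfl⟩)
    · rcases hcur with rfl | ⟨inner2, b2, rfl, rfl⟩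
      · -- depth 1 : gstk = [bot]
        by_cases hbr : c = '['
        · subst hbr
          have hB : pvStepB ((([] : List (List Char)) ++ [bot]).length, cur, segs, gFold gacc) '['
              = (([[]] ++ [bot ++ ['[']]).length, [], segs, gFold gacc) := by
            simp [pvStepB]
          have hG : gStep (([] : List (List Char)) ++ [bot], gacc) '[' = ([[]] ++ [bot ++ ['[']], gacc) := by
            simp [gStep]
          rw [List.foldl_cons, List.foldl_cons, hB, hG]
          refine ih ([[]] ++ [bot ++ ['[']]) gacc [] segs (Or.inr ⟨[[]], bot ++ ['['], rfl, ?_, Or.inr ⟨[], [], rfl, rfl⟩⟩)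
          rw [List.foldl_append, hrun]
          simp [gStep]
        · by_cases hcl : c = ']'
          · subst hcl
            have hB : pvStepB ((([] : List (List Char)) ++ [bot]).length, cur, segs, gFold gacc) ']'
                = (([] : List (List Char)).length, cur, [], pvCommit segs (gFold gacc)) := by
              simp [pvStepB]
            have hG : gStep (([] : List (List Char)) ++ [bot], gacc) ']' = ([], gacc ++ [bot]) := by
              simp [gStep]
            have hC : pvCommit segs (gFold gacc) = gFold (gacc ++ [bot]) := by
              rw [pvGfold_append, hrun]
              simp [Function.comp_def]
            rw [List.foldl_cons, List.foldl_cons, hB, hG, hC]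
            exact ih [] (gacc ++ [bot]) cur [] (Or.inl ⟨rfl, rfl⟩)
          · have hB : pvStepB ((([] : List (List Char)) ++ [bot]).length, cur, segs, gFold gacc) c
                = ((([] : List (List Char)) ++ [bot ++ [c]]).length, cur, segs, gFold gacc) := by
              simp [pvStepB, hbr, hcl]
            have hG : gStep (([] : List (List Char)) ++ [bot], gacc) c
                = (([] : List (List Char)) ++ [bot ++ [c]], gacc) := by
              simp [gStep, hbr, hcl]
            rw [List.foldl_cons, List.foldl_cons, hB, hG]
            refine ih ([] ++ [bot ++ [c]]) gacc cur segs (Or.inr ⟨[], bot ++ [c], rfl, ?_, Or.inl rfl⟩)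
            rw [List.foldl_append, hrun]
            simp [gStep, hbr, hcl]
      · -- depth ≥ 2 : gstk = (inner2 ++ [cur]) ++ [bot], cur = cur
        by_cases hbr : c = '['
        · subst hbr
          have hB : pvStepB (((inner2 ++ [cur]) ++ [bot]).length, cur, segs, gFold gacc) '['
              = ((([] :: (inner2 ++ [cur]).map (· ++ ['['])) ++ [bot ++ ['[']]).length,
                  cur ++ ['['], segs, gFold gacc) := by
            simp [pvStepB]
          have hG : gStep ((inner2 ++ [cur]) ++ [bot], gacc) '['
              = (([] :: (inner2 ++ [cur]).map (· ++ ['['])) ++ [bot ++ ['[']], gacc) := by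
            simp [gStep]
          rw [List.foldl_cons, List.foldl_cons, hB, hG]
          refine ih _ gacc (cur ++ ['[']) segs
            (Or.inr ⟨[] :: (inner2 ++ [cur]).map (· ++ ['[']), bot ++ ['['], rfl, ?_,
              Or.inr ⟨[] :: inner2.map (· ++ ['[']), cur ++ ['['], by simp, rfl⟩⟩)
          rw [List.foldl_append, hrun]
          simp [gStep]
        · by_cases hcl : c = ']'
          · subst hcl
            cases inner2 with
            | nil =>
              have hB : pvStepB ((([] : List (List Char)) ++ [cur] ++ [bot]).length, cur, segs, gFold gacc) ']'
                  = ((([] : List (List Char)) ++ [bot ++ [']']]).length, cur,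
                      segs ++ [String.ofList cur], gFold gacc) := by
                simp [pvStepB]
              have hG : gStep (([] : List (List Char)) ++ [cur] ++ [bot], gacc) ']'
                  = (([] : List (List Char)) ++ [bot ++ [']']], gacc) := by
                simp [gStep]
              rw [List.foldl_cons, List.foldl_cons, hB, hG]
              refine ih ([] ++ [bot ++ [']']]) gacc cur (segs ++ [String.ofList cur])
                (Or.inr ⟨[], bot ++ [']'], rfl, ?_, Or.inl rfl⟩)
              rw [List.foldl_append, hrun]
              simp [gStep]
            | cons h2 t2 =>
              have hB : pvStepB ((((h2 :: t2) ++ [cur]) ++ [bot]).length, cur, segs, gFold gacc) ']'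
                  = (((t2.map (· ++ [']']) ++ [cur ++ [']']]) ++ [bot ++ [']']]).length,
                      cur ++ [']'], segs, gFold gacc) := by
                simp [pvStepB]
              have hG : gStep (((h2 :: t2) ++ [cur]) ++ [bot], gacc) ']'
                  = ((t2.map (· ++ [']']) ++ [cur ++ [']']]) ++ [bot ++ [']']], gacc) := by
                simp [gStep]
              rw [List.foldl_cons, List.foldl_cons, hB, hG]
              refine ih _ gacc (cur ++ [']']) segs
                (Or.inr ⟨t2.map (· ++ [']']) ++ [cur ++ [']']], bot ++ [']'], rfl, ?_,
                  Or.inr ⟨t2.map (· ++ [']']), cur ++ [']'], rfl, rfl⟩⟩)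
              rw [List.foldl_append, hrun]
              simp [gStep]
          · have hB : pvStepB (((inner2 ++ [cur]) ++ [bot]).length, cur, segs, gFold gacc) c
                = (((inner2.map (· ++ [c]) ++ [cur ++ [c]]) ++ [bot ++ [c]]).length,
                    cur ++ [c], segs, gFold gacc) := by
              simp [pvStepB, hbr, hcl]
            have hG : gStep ((inner2 ++ [cur]) ++ [bot], gacc) c
                = ((inner2.map (· ++ [c]) ++ [cur ++ [c]]) ++ [bot ++ [c]], gacc) := by
              simp [gStep, hbr, hcl]
            rw [List.foldl_cons, List.foldl_cons, hB, hG]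
            refine ih _ gacc (cur ++ [c]) segs
              (Or.inr ⟨inner2.map (· ++ [c]) ++ [cur ++ [c]], bot ++ [c], rfl, ?_,
                Or.inr ⟨inner2.map (· ++ [c]), cur ++ [c], rfl, rfl⟩⟩)
            rw [List.foldl_append, hrun]
            simp [gStep, hbr, hcl]

theorem pvFBT_eq_ghost (s : String) :
    pyFindBracketedText s = ((s.toList.foldl gStep ([], [])).2).map String.ofList := by
  have := pvAgen s.toList s.toList 0 [] [] 0 (by simp) (by simp)
  simpa [pyFindBracketedText] using this

theorem pvSetdefault_eq (d : PySem.Dict String (List String)) (k : String) :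
    (if d.contains k then d else d.insert k []) = d.setdefault k [] := by
  by_cases h : d.contains k
  · rw [if_pos h]; exact (PySem.Dict.setdefault_of_contains d [] h).symm
  · rw [if_neg h]
    exact (PySem.Dict.setdefault_of_not_contains d [] (by simpa using h)).symm

theorem pvBody_eq (ts : List String) (d : PySem.Dict String (List String)) :
    (match ts with
      | [a] =>
        if ¬ PySem.Str.isIn "[" a ∧ ¬ PySem.Str.isIn "]" a then
          let d' := if d.contains "" then d else d.insert "" []
          d'.modify "" [] (fun l => l ++ [a])
        else d
      | [a, b] =>
        let d' := if d.contains b then d else d.insert b []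
        d'.modify b [] (fun l => l ++ [a])
      | [a, b, _] =>
        let d' := if d.contains b then d else d.insert b []
        d'.modify b [] (fun l => l ++ [a])
      | _ => d)
    = pvCommit ts d := by
  rcases ts with _ | ⟨a, _ | ⟨b, _ | ⟨e, rest⟩⟩⟩
  · rfl
  · simp only [pvCommit, List.length_cons, List.length_nil, List.getD]
    split_ifs with h1 h2 <;> simp_all
    · rw [PySem.Dict.setdefault_of_contains d [] h2]
    · rw [PySem.Dict.setdefault_of_not_contains d [] h2]
  · simp only [pvCommit, List.length_cons, List.length_nil, List.getD]
    norm_num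
    rw [pvSetdefault_eq]
  · cases rest with
    | nil =>
      simp only [pvCommit, List.length_cons, List.length_nil, List.getD]
      norm_num
      rw [pvSetdefault_eq]
    | cons f r =>
      simp only [pvCommit, List.length_cons]
      rw [if_neg (by simp), if_neg (by simp), if_neg (by simp)]

theorem pvBody_eq_aux (b : List Char) (d : PySem.Dict String (List String)) :
    pvCommit (pyFindBracketedText (String.ofList b)) d
      = pvCommit (((b.foldl gStep ([], [])).2).map String.ofList) d := by
  rw [pvFBT_eq_ghost]
  simp

theorem pv_main (text : String) : findLinksInText text = findLinksInText_alt text := by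
  have h1 : findLinksInText text
      = ((pyFindBracketedText text).foldl
          (fun d t => pvCommit (pyFindBracketedText t) d) PySem.Dict.empty).items := by
    rw [findLinksInText]
    congr 1
    refine List.foldl_ext _ _ _ ?_
    intro d t _
    exact pvBody_eq (pyFindBracketedText t) d
  have hB := pvBgen text.toList [] [] [] [] (Or.inl ⟨rfl, rfl⟩)
  simp only [List.length_nil] at hB
  have hE : gFold [] = (PySem.Dict.empty : PySem.Dict String (List String)) := rfl
  rw [hE] at hB
  rw [h1, findLinksInText_alt, hB]
  congr 1
  rw [pvFBT_eq_ghost, List.foldl_map, gFold]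
  refine List.foldl_ext _ _ _ ?_
  intro d b _
  rw [pvBody_eq_aux b d]


-- ===== VERDICT (by name: the statement is the Claim_ definition above) =====
theorem findLinksInText_spec : Claim_equal_findLinksInText := by
  intro text _
  unfold Spec_findLinksInText
  exact pv_main text
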